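-- pv_equiv track=rewrite | github.com/zlaabsi/opentq | src/opentq/runtime_gate.py | _variant_counts
-- ===== SOURCE A (Python) =====
-- from typing import Any
--
-- def _variant_counts(tensors: list[dict[str, Any]]) -> dict[str, int]:
--     counts: dict[str, int] = {}
--     for row in tensors:
--         if row.get("mode") != "quantize":
--             continue
--         variant = str(row.get("variant_name"))
--         counts[variant] = counts.get(variant, 0) + 1
--     return dict(sorted(counts.items()))
-- ===== SOURCE B (Python) =====
-- from itertools import groupby
-- from typing import Any
--
-- def _variant_counts(tensors: list[dict[str, Any]]) -> dict[str, int]: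
--     variants = [str(row.get("variant_name")) for row in tensors if row.get("mode") == "quantize"]
--     variants.sort()
--     return {k: sum(1 for _ in g) for k, g in groupby(variants)}
-- ===== Notes on version B (the rewrite author's own statement) =====
-- stated objective: alternative
-- what changed: Replaces A's hash-map counting followed by sorting the counted items with a collect-the-variants list that is sorted first and then aggregated by itertools.groupby over consecutive runs.
import Mathlib
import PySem

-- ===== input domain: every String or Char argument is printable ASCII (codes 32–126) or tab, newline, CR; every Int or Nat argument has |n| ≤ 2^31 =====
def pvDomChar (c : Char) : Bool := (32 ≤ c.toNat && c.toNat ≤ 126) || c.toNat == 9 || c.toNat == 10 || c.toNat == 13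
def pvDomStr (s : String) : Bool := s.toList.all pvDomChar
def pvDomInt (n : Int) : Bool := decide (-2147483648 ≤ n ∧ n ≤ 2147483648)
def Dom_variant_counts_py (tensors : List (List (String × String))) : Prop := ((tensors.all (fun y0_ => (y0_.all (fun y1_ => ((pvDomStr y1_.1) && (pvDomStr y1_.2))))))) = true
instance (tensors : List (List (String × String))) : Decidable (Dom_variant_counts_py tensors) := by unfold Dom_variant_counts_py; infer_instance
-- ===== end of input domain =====

-- B replaces A's hash-map counting + item sort with collect-sort-then-group-consecutive (groupby); equal return values, no speed claim.

-- str(row.get(k)): Python's str() of an Optional[str] — "None" for a missing key; exact on the string domain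
def pyStrOfOpt (o : Option String) : String :=
  match o with
  | none => "None"
  | some s => s

-- ===== PORT A =====
def variant_counts_py (tensors : List (List (String × String))) : List (String × Int) :=
  let counts : PySem.Dict String Int :=
    tensors.foldl (fun counts row =>
      if (PySem.Dict.mk row).get? "mode" ≠ some "quantize" then counts   -- continue
      else
        let variant := pyStrOfOpt ((PySem.Dict.mk row).get? "variant_name")
        counts.insert variant (counts.getD variant 0 + 1)) PySem.Dict.empty
  -- dict(sorted(counts.items())): Python sorts the (str, int) tuples lexicographically
  (PySem.Dict.ofList (PySem.List.sorted2 counts.items Prod.fst Prod.snd)).items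

-- ===== PORT B =====
-- the list comprehension: variants of the quantize rows
def quantVariants (tensors : List (List (String × String))) : List String :=
  (tensors.filter (fun row => (PySem.Dict.mk row).get? "mode" == some "quantize")).map
    (fun row => pyStrOfOpt ((PySem.Dict.mk row).get? "variant_name"))

-- {k: sum(1 for _ in g) for k, g in groupby(s)}: consecutive runs of a (sorted) list with their lengths
def pyGroupCount (s : List String) : List (String × Int) :=
  match s with
  | [] => []
  | x :: xs =>
      (x, 1 + ((xs.takeWhile (· == x)).length : Int)) :: pyGroupCount (xs.dropWhile (· == x))
termination_by s.length
decreasing_by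
  simp only [List.length_cons]
  exact Nat.lt_succ_of_le (List.length_dropWhile_le _ _)

def variant_counts_py_alt (tensors : List (List (String × String))) : List (String × Int) :=
  pyGroupCount (PySem.List.sorted (quantVariants tensors) (fun x => x) false)

-- ===== PRECONDITION & SPEC =====
def Spec_variant_counts_py (tensors : List (List (String × String))) (out : List (String × Int)) : Prop := out = variant_counts_py_alt tensors
instance (tensors : List (List (String × String))) (out : List (String × Int)) : Decidable (Spec_variant_counts_py tensors out) := by unfold Spec_variant_counts_py; infer_instance

-- ===== CLAIM (what is proved, stated in full; the proofs are below) =====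
def Claim_equal_variant_counts_py : Prop := ∀ (tensors : List (List (String × String))), Dom_variant_counts_py tensors → Spec_variant_counts_py tensors (variant_counts_py tensors)

-- ===== LEMMAS AND PROOFS =====

-- the canonical value both programs compute: distinct variants in sorted order, each with its multiplicity
def canonCounts (vs : List String) : List (String × Int) :=
  (PySem.List.sorted (PySem.Set.ofList vs) (fun x => x) false).map (fun k => (k, (vs.count k : Int)))

-- A's row loop is the counting fold over exactly the collected variant list
theorem foldl_rows_eq_foldl_variants (tensors : List (List (String × String)))
    (d : PySem.Dict String Int) :
    tensors.foldl (fun counts row =>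
      if (PySem.Dict.mk row).get? "mode" ≠ some "quantize" then counts
      else
        let variant := pyStrOfOpt ((PySem.Dict.mk row).get? "variant_name")
        counts.insert variant (counts.getD variant 0 + 1)) d
    = (quantVariants tensors).foldl (fun d x => d.insert x (d.getD x 0 + 1)) d := by
  induction tensors generalizing d with
  | nil => rfl
  | cons row rest ih =>
    simp only [List.foldl_cons]
    by_cases h : (PySem.Dict.mk row).get? "mode" = some "quantize"
    · rw [if_neg (not_not_intro h), ih]
      have : quantVariants (row :: rest)
          = pyStrOfOpt ((PySem.Dict.mk row).get? "variant_name") :: quantVariants rest := by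
        simp [quantVariants, h]
      rw [this, List.foldl_cons]
    · rw [if_pos h, ih]
      have : quantVariants (row :: rest) = quantVariants rest := by
        simp [quantVariants, h]
      rw [this]

-- insertBy with comparators that agree on the new element against the list
theorem insertBy_congr {α : Type} (b₁ b₂ : α → α → Bool) (x : α) (ys : List α)
    (h : ∀ y ∈ ys, b₁ x y = b₂ x y) :
    PySem.List.insertBy b₁ x ys = PySem.List.insertBy b₂ x ys := by
  induction ys with
  | nil => rfl
  | cons y ys ih =>
    simp only [PySem.List.insertBy]
    rw [h y (by simp)]
    split
    · rfl
    · rw [ih (fun z hz => h z (by simp [hz]))]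

-- an insertion-sort fold with comparators that agree on all elements drawn from the input
theorem foldl_insertBy_congr {α : Type} (P : α → Prop) (b₁ b₂ : α → α → Bool)
    (hb : ∀ x y, P x → P y → b₁ x y = b₂ x y) :
    ∀ (xs acc : List α), (∀ x ∈ xs, P x) → (∀ y ∈ acc, P y) →
    xs.foldl (fun acc x => PySem.List.insertBy b₁ x acc) acc
      = xs.foldl (fun acc x => PySem.List.insertBy b₂ x acc) acc := by
  intro xs
  induction xs with
  | nil => intro acc _ _; rfl
  | cons x xs ih =>
    intro acc hxs hacc
    simp only [List.foldl_cons]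
    rw [insertBy_congr b₁ b₂ x acc
        (fun y hy => hb x y (hxs x (by simp)) (hacc y hy))]
    exact ih _ (fun z hz => hxs z (by simp [hz]))
      (fun z hz => by
        rcases (PySem.List.mem_insertBy b₂ x z acc).mp hz with h | h
        · exact h ▸ hxs x (by simp)
        · exact hacc z h)

-- sorted(counts.items()): the tuple comparison never reaches the second component
-- because all first components are distinct, so it equals sorting by key alone — and
-- that is the canonical list
theorem sorted2_items_counter (vs : List String) :
    PySem.List.sorted2 (PySem.Dict.counter vs).items Prod.fst Prod.snd = canonCounts vs := by
  have hitems := PySem.Dict.items_counter vs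
  have hperm : (canonCounts vs).Perm (PySem.Dict.counter vs).items := by
    rw [hitems, canonCounts]
    exact (PySem.List.sorted_perm (PySem.Set.ofList vs) (fun x => x) false).map _
  have hpw : (canonCounts vs).Pairwise (fun a b => a.1 < b.1) := by
    unfold canonCounts
    exact List.Pairwise.map _ (by intro a b h; simpa using h)
      (PySem.List.sorted_ofList_pairwise_lt vs)
  -- comparators agree on items of the counter (distinct keys)
  have hinj : ∀ p ∈ (PySem.Dict.counter vs).items, ∀ q ∈ (PySem.Dict.counter vs).items,
      p.1 = q.1 → p = q := by
    rw [hitems]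
    intro p hp q hq h1
    rcases List.mem_map.mp hp with ⟨kp, _, rfl⟩
    rcases List.mem_map.mp hq with ⟨kq, _, rfl⟩
    simp only at h1
    rw [h1]
  have hcong :
      PySem.List.sorted2 (PySem.Dict.counter vs).items Prod.fst Prod.snd
        = PySem.List.sorted (PySem.Dict.counter vs).items Prod.fst false := by
    simp only [PySem.List.sorted2, PySem.List.sorted]
    refine foldl_insertBy_congr (fun p => p ∈ (PySem.Dict.counter vs).items) _ _
      ?_ _ [] (fun x hx => hx) (by simp)
    intro x y hx hy
    by_cases hxy : x.1 = y.1
    · have : x = y := hinj x hx y hy hxy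
      subst this
      simp
    · rcases lt_or_gt_of_ne hxy with h | h
      · simp [h]
      · simp [h, not_lt_of_gt h]
  rw [hcong]
  exact PySem.List.sorted_eq_of_perm_of_pairwise_lt _ _ _ hperm hpw

-- the canonical list has pairwise-distinct keys, so dict() keeps it unchanged
theorem items_ofList_canon (vs : List String) :
    (PySem.Dict.ofList (canonCounts vs)).items = canonCounts vs := by
  have hnd : ((canonCounts vs).map Prod.fst).Nodup := by
    unfold canonCounts
    rw [List.map_map]
    have : ((PySem.List.sorted (PySem.Set.ofList vs) (fun x => x) false).map
        (Prod.fst ∘ fun k => (k, (vs.count k : Int)))) =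
        PySem.List.sorted (PySem.Set.ofList vs) (fun x => x) false := by
      simp [Function.comp_def]
    rw [this]
    exact (PySem.List.sorted_ofList_pairwise_lt vs).nodup
  have := PySem.Dict.items_foldl_insert_fresh (canonCounts vs) Prod.fst Prod.snd
    PySem.Dict.empty (fun a _ => by simp [PySem.Dict.contains_empty]) hnd
  simpa [PySem.Dict.ofList, PySem.Dict.update] using this

-- every element the run-skipping recursion still faces is strictly above the dropped head
theorem lt_of_mem_dropWhile_sorted (x : String) (xs : List String)
    (hs : xs.Pairwise (· ≤ ·)) (hx : ∀ y ∈ xs, x ≤ y) :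
    ∀ z ∈ xs.dropWhile (· == x), x < z := by
  intro z hz
  rcases hd : xs.dropWhile (· == x) with _ | ⟨y, d'⟩
  · simp [hd] at hz
  · have hy_ne : (y == x) = false := by
      have := List.head?_dropWhile_not (p := (· == x)) (l := xs)
      rw [hd] at this
      simpa using this
    have hy_mem : y ∈ xs := (List.dropWhile_sublist _).subset (by rw [hd]; exact List.mem_cons_self ..)
    have hxy : x < y := lt_of_le_of_ne (hx y hy_mem) (by
      intro h; rw [← h] at hy_ne; simp at hy_ne)
    have hsuff : (y :: d').Sublist xs := hd ▸ List.dropWhile_sublist _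
    have hpw : (y :: d').Pairwise (· ≤ ·) := hs.sublist hsuff
    rw [hd] at hz
    rcases List.mem_cons.mp hz with rfl | hz
    · exact hxy
    · exact lt_of_lt_of_le hxy (List.rel_of_pairwise_cons hpw hz)

-- groupby over a sorted list produces the canonical counted list
theorem pyGroupCount_sorted (s : List String) (hs : s.Pairwise (· ≤ ·)) :
    pyGroupCount s = canonCounts s := by
  match s with
  | [] => simp [pyGroupCount, canonCounts, PySem.List.sorted]
  | x :: xs =>
    have hx : ∀ y ∈ xs, x ≤ y := fun y hy => List.rel_of_pairwise_cons hs hy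
    have hxs : xs.Pairwise (· ≤ ·) := hs.tail
    set t := xs.takeWhile (· == x) with ht
    set d := xs.dropWhile (· == x) with hdd
    have htd : t ++ d = xs := List.takeWhile_append_dropWhile
    have ht_all : ∀ y ∈ t, y = x := by
      intro y hy
      have := List.mem_takeWhile_imp (ht ▸ hy)
      simpa using this
    have hd_all : ∀ z ∈ d, x < z := lt_of_mem_dropWhile_sorted x xs hxs hx
    have hd_pw : d.Pairwise (· ≤ ·) := hxs.sublist (List.dropWhile_sublist _)
    have ih : pyGroupCount d = canonCounts d :=
      pyGroupCount_sorted d hd_pw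
    -- counts in the full list
    have hcount_t : t.count x = t.length := by
      rw [List.count_eq_length]
      intro y hy; exact (ht_all y hy).symm
    have hcount_d : d.count x = 0 := by
      rw [List.count_eq_zero]
      intro hmem; exact absurd (hd_all x hmem) (lt_irrefl x)
    have hcount_x : (x :: xs).count x = 1 + t.length := by
      rw [← htd, List.count_cons_self, List.count_append, hcount_t, hcount_d]
      omega
    have hcount_k : ∀ k, x < k → (x :: xs).count k = d.count k := by
      intro k hk
      rw [← htd, List.count_cons_of_ne (by exact fun h => absurd (h ▸ hk) (lt_irrefl x)),
        List.count_append]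
      have : t.count k = 0 := by
        rw [List.count_eq_zero]
        intro hkm
        exact absurd ((ht_all k hkm) ▸ hk) (lt_irrefl x)
      omega
    -- the sorted distinct keys of x::xs are x followed by those of d
    have hkeys : PySem.List.sorted (PySem.Set.ofList (x :: xs)) (fun y => y) false
        = x :: PySem.List.sorted (PySem.Set.ofList d) (fun y => y) false := by
      apply PySem.List.sorted_eq_of_perm_of_pairwise_lt
      · -- permutation: both are nodup with identical membership
        apply (List.perm_ext_iff_of_nodup ?_ ?_).mpr
        · intro a
          simp only [List.mem_cons, PySem.List.mem_sorted, PySem.Set.mem_ofList]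
          constructor
          · rintro (rfl | ha)
            · exact Or.inl rfl
            · exact Or.inr (htd ▸ List.mem_append_right t ha)
          · rintro (rfl | ha)
            · exact Or.inl rfl
            · rw [← htd] at ha
              rcases List.mem_append.mp ha with h | h
              · exact Or.inl (ht_all a h)
              · exact Or.inr h
        · exact List.Nodup.cons (by
            intro hmem
            rw [PySem.List.mem_sorted, PySem.Set.mem_ofList] at hmem
            exact absurd (hd_all x hmem) (lt_irrefl x))
            (PySem.List.sorted_ofList_pairwise_lt d).nodup
        · exact PySem.Set.nodup_ofList _
      · exact List.Pairwise.cons (by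
          intro z hz
          rw [PySem.List.mem_sorted, PySem.Set.mem_ofList] at hz
          exact hd_all z hz) (PySem.List.sorted_ofList_pairwise_lt d)
    rw [pyGroupCount, canonCounts, hkeys, List.map_cons]
    refine congrArg₂ _ ?_ ?_
    · simp only [← ht, hcount_x]
      push_cast
      ring_nf
    · rw [ih, canonCounts]
      apply List.map_congr_left
      intro k hk
      rw [PySem.List.mem_sorted, PySem.Set.mem_ofList] at hk
      rw [hcount_k k (hd_all k hk)]
termination_by s.length
decreasing_by
  simp only [List.length_cons]
  exact Nat.lt_succ_of_le (List.length_dropWhile_le _ _)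

-- ===== VERDICT (by name: the statement is the Claim_ definition above) =====
theorem variant_counts_py_spec : Claim_equal_variant_counts_py := by
  intro tensors _
  unfold Spec_variant_counts_py variant_counts_py variant_counts_py_alt
  set vs := quantVariants tensors with hvs
  rw [foldl_rows_eq_foldl_variants, PySem.Dict.foldl_insert_getD_add_one_eq_counter]
  show (PySem.Dict.ofList (PySem.List.sorted2 (PySem.Dict.counter vs).items Prod.fst Prod.snd)).items
      = pyGroupCount (PySem.List.sorted vs (fun x => x) false)
  rw [sorted2_items_counter, items_ofList_canon]
  -- B side
  set s := PySem.List.sorted vs (fun x => x) false with hsdef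
  have hs_pw : s.Pairwise (· ≤ ·) := PySem.List.sorted_pairwise vs (fun x => x)
  rw [pyGroupCount_sorted s hs_pw]
  -- canonCounts of a permutation is unchanged
  have hperm : s.Perm vs := PySem.List.sorted_perm vs (fun x => x) false
  unfold canonCounts
  have hkeys : PySem.List.sorted (PySem.Set.ofList s) (fun x => x) false
      = PySem.List.sorted (PySem.Set.ofList vs) (fun x => x) false := by
    apply PySem.List.sorted_eq_of_perm_of_pairwise_lt
    · apply (List.perm_ext_iff_of_nodup (PySem.List.sorted_ofList_pairwise_lt vs).nodup
        (PySem.Set.nodup_ofList _)).mpr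
      intro a
      rw [PySem.List.mem_sorted, PySem.Set.mem_ofList, PySem.Set.mem_ofList]
      exact hperm.mem_iff.symm
    · exact PySem.List.sorted_ofList_pairwise_lt vs
  rw [hkeys]
  apply List.map_congr_left
  intro k _
  rw [hperm.count_eq]
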